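-- pv_equiv track=rewrite | github.com/redhat-ai-americas/legal-document-analysis-demo | utils/term_aliases.py | alias_to_canonical
-- ===== SOURCE A (Python) =====
-- from typing import Dict, Set
--
-- def get_term_aliases() -> Dict[str, Set[str]]:
--     # Canonical -> aliases (lowercase)
--     return {
--         # Questionnaire canonical terms
--         "intellectual_property_rights": {
--             "intellectual_property_rights", "ip_rights", "ip", "intellectual_property",
--         },
--         "assignment_change_of_control": {
--             "assignment_change_of_control", "change_of_control", "coc", "assignment", "assign",
--         },
--         "most_favored_nation": {
--             "most_favored_nation", "mfn", "mfc", "favored_pricing", "most_favored",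
--             "best_pricing", "equal_or_better", "matching", "comparable_pricing",
--         },
--         "limitation_of_liability": {
--             "limitation_of_liability", "liability_cap", "indirect_damages", "consequential_damages",
--             "lost_profits", "special_damages", "exemplary_damages",
--         },
--         "indemnification": {
--             "indemnification", "indemnity", "indemnify",
--         },
--         "non_compete_exclusivity": {
--             "non_compete_exclusivity", "non_compete", "exclusivity", "exclusive", "exclusive_rights",
--         },
--         "source_code_escrow": {
--             "source_code_escrow", "escrow", "source_code",
--         },
--         "term": {
--             "term", "effective_date", "start_date", "initial_term", "duration",
--         },
--
--         # Data/privacy related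
--         "data_processing_agreement": {
--             "data_processing_agreement", "dpa", "processing_activities", "subprocessor", "tom",
--             "technical_and_organizational_measures",
--         },
--         "data_breach": {"data_breach", "breach_notification", "immediate_notification", "fixed_timeframe"},
--         "data_transfer": {"data_transfer", "sub_processor", "subprocessor"},
--     }
--
-- def alias_to_canonical(term: str) -> str:
--     """Map any alias or canonical label to its canonical term key; returns original if unknown."""
--     t = (term or "").lower().strip()
--     aliases = get_term_aliases()
--     # direct match to a canonical key
--     if t in aliases:
--         return t
--     # search aliases
--     for canonical, alias_set in aliases.items():
--         if t in alias_set: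
--             return canonical
--     return term
-- ===== SOURCE B (Python) =====
-- from typing import Dict
--
-- # Flat alias -> canonical map, written out directly (the duplicate alias
-- # "subprocessor" is resolved by hand to data_processing_agreement, the first
-- # table entry that contains it).
-- _ALIAS_MAP: Dict[str, str] = {
--     "intellectual_property_rights": "intellectual_property_rights",
--     "ip_rights": "intellectual_property_rights",
--     "ip": "intellectual_property_rights",
--     "intellectual_property": "intellectual_property_rights",
--     "assignment_change_of_control": "assignment_change_of_control",
--     "change_of_control": "assignment_change_of_control",
--     "coc": "assignment_change_of_control",
--     "assignment": "assignment_change_of_control",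
--     "assign": "assignment_change_of_control",
--     "most_favored_nation": "most_favored_nation",
--     "mfn": "most_favored_nation",
--     "mfc": "most_favored_nation",
--     "favored_pricing": "most_favored_nation",
--     "most_favored": "most_favored_nation",
--     "best_pricing": "most_favored_nation",
--     "equal_or_better": "most_favored_nation",
--     "matching": "most_favored_nation",
--     "comparable_pricing": "most_favored_nation",
--     "limitation_of_liability": "limitation_of_liability",
--     "liability_cap": "limitation_of_liability",
--     "indirect_damages": "limitation_of_liability",
--     "consequential_damages": "limitation_of_liability",
--     "lost_profits": "limitation_of_liability",
--     "special_damages": "limitation_of_liability",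
--     "exemplary_damages": "limitation_of_liability",
--     "indemnification": "indemnification",
--     "indemnity": "indemnification",
--     "indemnify": "indemnification",
--     "non_compete_exclusivity": "non_compete_exclusivity",
--     "non_compete": "non_compete_exclusivity",
--     "exclusivity": "non_compete_exclusivity",
--     "exclusive": "non_compete_exclusivity",
--     "exclusive_rights": "non_compete_exclusivity",
--     "source_code_escrow": "source_code_escrow",
--     "escrow": "source_code_escrow",
--     "source_code": "source_code_escrow",
--     "term": "term",
--     "effective_date": "term",
--     "start_date": "term",
--     "initial_term": "term",
--     "duration": "term",
--     "data_processing_agreement": "data_processing_agreement",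
--     "dpa": "data_processing_agreement",
--     "processing_activities": "data_processing_agreement",
--     "subprocessor": "data_processing_agreement",
--     "tom": "data_processing_agreement",
--     "technical_and_organizational_measures": "data_processing_agreement",
--     "data_breach": "data_breach",
--     "breach_notification": "data_breach",
--     "immediate_notification": "data_breach",
--     "fixed_timeframe": "data_breach",
--     "data_transfer": "data_transfer",
--     "sub_processor": "data_transfer",
-- }
--
-- def alias_to_canonical(term: str) -> str:
--     """Map any alias or canonical label to its canonical term key; returns original if unknown."""
--     t = (term or "").lower().strip()
--     return _ALIAS_MAP.get(t, term)
-- ===== Notes on version B (the rewrite author's own statement) =====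
-- stated objective: idiomatic
-- what changed: B replaces the nested canonical->alias-set table and its per-call linear scan by a single hand-written flat alias->canonical dict literal (the duplicate alias 'subprocessor' resolved to data_processing_agreement, matching A's insertion-order first match), so alias_to_canonical is one dict lookup with a default.
import Mathlib
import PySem

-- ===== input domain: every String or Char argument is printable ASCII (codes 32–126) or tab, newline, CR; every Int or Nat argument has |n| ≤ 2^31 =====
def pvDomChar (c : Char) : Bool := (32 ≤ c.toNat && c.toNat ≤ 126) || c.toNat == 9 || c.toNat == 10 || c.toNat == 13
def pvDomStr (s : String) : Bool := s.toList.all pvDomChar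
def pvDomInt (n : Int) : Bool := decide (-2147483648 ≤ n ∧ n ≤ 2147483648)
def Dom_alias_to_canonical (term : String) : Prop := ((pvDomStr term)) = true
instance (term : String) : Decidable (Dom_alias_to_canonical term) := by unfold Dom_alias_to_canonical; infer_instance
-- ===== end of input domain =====

set_option maxRecDepth 20000


-- B replaces A's nested canonical->alias-set table and per-call scan by a flat
-- hand-written alias->canonical dict literal, making each call a single lookup (idiomatic).

-- ===== PORT A =====
-- A's table: canonical -> set of aliases (Python dict insertion order)
def pvTable : List (String × PySem.Set String) := [
  ("intellectual_property_rights", PySem.Set.ofList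
    ["intellectual_property_rights", "ip_rights", "ip", "intellectual_property"]),
  ("assignment_change_of_control", PySem.Set.ofList
    ["assignment_change_of_control", "change_of_control", "coc", "assignment", "assign"]),
  ("most_favored_nation", PySem.Set.ofList
    ["most_favored_nation", "mfn", "mfc", "favored_pricing", "most_favored",
     "best_pricing", "equal_or_better", "matching", "comparable_pricing"]),
  ("limitation_of_liability", PySem.Set.ofList
    ["limitation_of_liability", "liability_cap", "indirect_damages", "consequential_damages",
     "lost_profits", "special_damages", "exemplary_damages"]),
  ("indemnification", PySem.Set.ofList
    ["indemnification", "indemnity", "indemnify"]),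
  ("non_compete_exclusivity", PySem.Set.ofList
    ["non_compete_exclusivity", "non_compete", "exclusivity", "exclusive", "exclusive_rights"]),
  ("source_code_escrow", PySem.Set.ofList
    ["source_code_escrow", "escrow", "source_code"]),
  ("term", PySem.Set.ofList
    ["term", "effective_date", "start_date", "initial_term", "duration"]),
  ("data_processing_agreement", PySem.Set.ofList
    ["data_processing_agreement", "dpa", "processing_activities", "subprocessor", "tom",
     "technical_and_organizational_measures"]),
  ("data_breach", PySem.Set.ofList
    ["data_breach", "breach_notification", "immediate_notification", "fixed_timeframe"]),
  ("data_transfer", PySem.Set.ofList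
    ["data_transfer", "sub_processor", "subprocessor"])]

-- A's 'for canonical, alias_set in aliases.items(): if t in alias_set: return canonical' loop
def pvSearchA : List (String × PySem.Set String) → String → String → String
  | [], _, term => term
  | (canonical, aliasSet) :: rest, t, term =>
      if PySem.Set.contains aliasSet t then canonical else pvSearchA rest t term

def alias_to_canonical (term : String) : String :=
  -- t = (term or "").lower().strip()
  let t := PySem.Str.strip (PySem.Str.lower (if term == "" then "" else term))
  let aliases := PySem.Dict.ofList pvTable
  if aliases.contains t then t
  else pvSearchA aliases.items t term

-- ===== PORT B =====
-- Source B's flat literal dict _ALIAS_MAP (alias -> canonical; 'subprocessor' resolved by hand)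
def pvAliasMap : PySem.Dict String String := PySem.Dict.ofList [
  ("intellectual_property_rights", "intellectual_property_rights"),
  ("ip_rights", "intellectual_property_rights"),
  ("ip", "intellectual_property_rights"),
  ("intellectual_property", "intellectual_property_rights"),
  ("assignment_change_of_control", "assignment_change_of_control"),
  ("change_of_control", "assignment_change_of_control"),
  ("coc", "assignment_change_of_control"),
  ("assignment", "assignment_change_of_control"),
  ("assign", "assignment_change_of_control"),
  ("most_favored_nation", "most_favored_nation"),
  ("mfn", "most_favored_nation"),
  ("mfc", "most_favored_nation"),
  ("favored_pricing", "most_favored_nation"),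
  ("most_favored", "most_favored_nation"),
  ("best_pricing", "most_favored_nation"),
  ("equal_or_better", "most_favored_nation"),
  ("matching", "most_favored_nation"),
  ("comparable_pricing", "most_favored_nation"),
  ("limitation_of_liability", "limitation_of_liability"),
  ("liability_cap", "limitation_of_liability"),
  ("indirect_damages", "limitation_of_liability"),
  ("consequential_damages", "limitation_of_liability"),
  ("lost_profits", "limitation_of_liability"),
  ("special_damages", "limitation_of_liability"),
  ("exemplary_damages", "limitation_of_liability"),
  ("indemnification", "indemnification"),
  ("indemnity", "indemnification"),
  ("indemnify", "indemnification"),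
  ("non_compete_exclusivity", "non_compete_exclusivity"),
  ("non_compete", "non_compete_exclusivity"),
  ("exclusivity", "non_compete_exclusivity"),
  ("exclusive", "non_compete_exclusivity"),
  ("exclusive_rights", "non_compete_exclusivity"),
  ("source_code_escrow", "source_code_escrow"),
  ("escrow", "source_code_escrow"),
  ("source_code", "source_code_escrow"),
  ("term", "term"),
  ("effective_date", "term"),
  ("start_date", "term"),
  ("initial_term", "term"),
  ("duration", "term"),
  ("data_processing_agreement", "data_processing_agreement"),
  ("dpa", "data_processing_agreement"),
  ("processing_activities", "data_processing_agreement"),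
  ("subprocessor", "data_processing_agreement"),
  ("tom", "data_processing_agreement"),
  ("technical_and_organizational_measures", "data_processing_agreement"),
  ("data_breach", "data_breach"),
  ("breach_notification", "data_breach"),
  ("immediate_notification", "data_breach"),
  ("fixed_timeframe", "data_breach"),
  ("data_transfer", "data_transfer"),
  ("sub_processor", "data_transfer")]

def alias_to_canonical_alt (term : String) : String :=
  let t := PySem.Str.strip (PySem.Str.lower (if term == "" then "" else term))
  (pvAliasMap.get? t).getD term

-- ===== PRECONDITION & SPEC =====
def Spec_alias_to_canonical (term : String) (out : String) : Prop := out = alias_to_canonical_alt term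
instance (term : String) (out : String) : Decidable (Spec_alias_to_canonical term out) := by unfold Spec_alias_to_canonical; infer_instance

-- ===== CLAIM (what is proved, stated in full; the proofs are below) =====
def Claim_equal_alias_to_canonical : Prop := ∀ (term : String), Dom_alias_to_canonical term → Spec_alias_to_canonical term (alias_to_canonical term)

-- ===== LEMMAS AND PROOFS =====

-- first canonical key of A's table whose alias set contains t
def pvFirstMatch (items : List (String × PySem.Set String)) (t : String) : Option String :=
  items.findSome? (fun p => if PySem.Set.contains p.2 t then some p.1 else none)

theorem pvSearchA_eq (items : List (String × PySem.Set String)) (t term : String) :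
    pvSearchA items t term = (pvFirstMatch items t).getD term := by
  induction items with
  | nil => rfl
  | cons p rest ih =>
    obtain ⟨c, s⟩ := p
    simp only [pvSearchA, pvFirstMatch, List.findSome?_cons]
    split_ifs with h <;> simp [ih, pvFirstMatch]

theorem pv_items_eq : (PySem.Dict.ofList pvTable).items = pvTable := by decide

-- every canonical key's own alias set is its first match in the table
theorem pv_contains_first (t : String)
    (h : (PySem.Dict.ofList pvTable).contains t = true) :
    pvFirstMatch pvTable t = some t := by
  unfold PySem.Dict.contains at h
  rw [pv_items_eq] at h
  rw [List.any_eq_true] at h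
  obtain ⟨p, hp, he⟩ := h
  have ht : p.1 = t := by simpa using he
  subst ht
  fin_cases hp <;> decide

-- B's flat map agrees with A's first-match scan on every string
theorem pvAliasMap_eq_firstMatch (t : String) :
    pvAliasMap.get? t = pvFirstMatch pvTable t := by
  by_cases hmem : t ∈ pvAliasMap.keys
  · have hk : pvAliasMap.keys =
      ["intellectual_property_rights", "ip_rights", "ip", "intellectual_property",
       "assignment_change_of_control", "change_of_control", "coc", "assignment", "assign",
       "most_favored_nation", "mfn", "mfc", "favored_pricing", "most_favored",
       "best_pricing", "equal_or_better", "matching", "comparable_pricing",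
       "limitation_of_liability", "liability_cap", "indirect_damages", "consequential_damages",
       "lost_profits", "special_damages", "exemplary_damages",
       "indemnification", "indemnity", "indemnify",
       "non_compete_exclusivity", "non_compete", "exclusivity", "exclusive", "exclusive_rights",
       "source_code_escrow", "escrow", "source_code",
       "term", "effective_date", "start_date", "initial_term", "duration",
       "data_processing_agreement", "dpa", "processing_activities", "subprocessor", "tom",
       "technical_and_organizational_measures",
       "data_breach", "breach_notification", "immediate_notification", "fixed_timeframe",
       "data_transfer", "sub_processor"] := by decide
    rw [hk] at hmem
    fin_cases hmem <;> decide
  · have hg : pvAliasMap.get? t = none := by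
      rw [PySem.Dict.get?_eq_none_iff_not_mem_keys]; exact hmem
    rw [hg]
    cases hfm : pvFirstMatch pvTable t with
    | none => rfl
    | some c =>
      exfalso
      obtain ⟨p, hp, he⟩ := List.exists_of_findSome?_eq_some hfm
      have hcont : PySem.Set.contains p.2 t = true := by
        by_contra hc
        simp at hc
        simp [hc] at he
      have htin : t ∈ p.2 := by
        simpa [PySem.Set.contains] using hcont
      -- every alias of the table is a key of the flat map
      have hall : ∀ q ∈ pvTable, ∀ a ∈ q.2, a ∈ pvAliasMap.keys := by decide
      exact hmem (hall p hp t htin)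

-- ===== VERDICT (by name: the statement is the Claim_ definition above) =====
theorem alias_to_canonical_spec : Claim_equal_alias_to_canonical := by
  intro term _
  unfold Spec_alias_to_canonical alias_to_canonical alias_to_canonical_alt
  simp only
  rw [pvAliasMap_eq_firstMatch, pv_items_eq, pvSearchA_eq]
  split_ifs with h1 h2 h3
  · rw [pv_contains_first _ h2]; rfl
  · rfl
  · rw [pv_contains_first _ h3]; rfl
  · rfl
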